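-- pv_equiv track=rewrite | github.com/sunpan9209/BigQuery-Agent-Analytics-SDK | src/bigquery_ontology/graph_ddl_compiler.py | _join_entries
-- ===== SOURCE A (Python) =====
-- def _join_entries(entries: list[list[str]]) -> list[str]:
--   """Flatten a list of multi-line entries, adding trailing commas.
--
--   Each entry is itself a list of lines (so an entry can span multiple
--   rows without the caller having to thread commas through). We append
--   a single ``,`` to the last line of every entry except the final
--   one, mirroring how the spec's example formats node / edge lists.
--   """
--   out: list[str] = []
--   for i, entry in enumerate(entries):
--     for j, line in enumerate(entry):
--       is_last_line = j == len(entry) - 1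
--       is_last_entry = i == len(entries) - 1
--       if is_last_line and not is_last_entry:
--         out.append(line + ",")
--       else:
--         out.append(line)
--   return out
-- ===== SOURCE B (Python) =====
-- def _join_entries(entries: list[list[str]]) -> list[str]:
--   """Flatten first, then add commas at precomputed positions.
--
--   Pass 1 flattens every entry's lines into one list. Pass 2 records,
--   in a set, the global index of the last line of each non-empty entry
--   other than the final entry. Pass 3 rewrites exactly the marked
--   lines with a trailing comma.
--   """
--   flat = [line for entry in entries for line in entry]
--   marks = set()
--   pos = 0
--   for entry in entries[:-1]:
--     pos += len(entry)
--     if entry: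
--       marks.add(pos - 1)
--   return [line + "," if k in marks else line for k, line in enumerate(flat)]
-- ===== Notes on version B (the rewrite author's own statement) =====
-- stated objective: alternative
-- what changed: Replaces A's single nested loop with per-line is_last_line/is_last_entry flags by three staged passes: flatten all lines first, precompute a set of global indices of the comma-carrying lines (last line of each non-empty entry except the final entry) via prefix sums, then annotate the flat list by membership in that set.
import Mathlib
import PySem

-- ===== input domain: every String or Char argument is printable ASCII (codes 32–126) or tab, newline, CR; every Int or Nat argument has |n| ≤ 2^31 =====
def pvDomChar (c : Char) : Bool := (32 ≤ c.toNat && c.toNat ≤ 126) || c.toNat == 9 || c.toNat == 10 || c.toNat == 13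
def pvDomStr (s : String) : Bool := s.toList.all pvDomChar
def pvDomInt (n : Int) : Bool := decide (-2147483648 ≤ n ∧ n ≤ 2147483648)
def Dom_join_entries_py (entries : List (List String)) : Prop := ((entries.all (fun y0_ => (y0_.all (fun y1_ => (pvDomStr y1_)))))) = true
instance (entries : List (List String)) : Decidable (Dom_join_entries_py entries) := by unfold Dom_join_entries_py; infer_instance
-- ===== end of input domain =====

-- B replaces A's per-line index/flag bookkeeping with staged passes: flatten all
-- lines, compute a set of global comma positions, then annotate (return value only).

-- ===== PORT A =====
def join_entries_py (entries : List (List String)) : List String :=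
  (PySem.List.enumerate entries).foldl (fun out ie =>
    (PySem.List.enumerate ie.2).foldl (fun out' jl =>
      let is_last_line := jl.1 = (ie.2.length : Int) - 1
      let is_last_entry := ie.1 = (entries.length : Int) - 1
      if is_last_line ∧ ¬ is_last_entry then out' ++ [jl.2 ++ ","] else out' ++ [jl.2]) out) []

-- ===== PORT B =====
def join_entries_py_alt (entries : List (List String)) : List String :=
  let flat := entries.flatMap (fun entry => entry)
  let st := (PySem.List.slice entries none (some (-1))).foldl
      (fun (st : PySem.Set Int × Int) entry =>
        let pos := st.2 + (entry.length : Int)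
        (if entry ≠ [] then PySem.Set.add st.1 (pos - 1) else st.1, pos))
      (PySem.Set.empty, 0)
  (PySem.List.enumerate flat).map (fun kl =>
    if PySem.Set.contains st.1 kl.1 then kl.2 ++ "," else kl.2)

-- ===== PRECONDITION & SPEC =====
def Spec_join_entries_py (entries : List (List String)) (out : List String) : Prop := out = join_entries_py_alt entries
instance (entries : List (List String)) (out : List String) : Decidable (Spec_join_entries_py entries out) := by unfold Spec_join_entries_py; infer_instance

-- ===== CLAIM (what is proved, stated in full; the proofs are below) =====
def Claim_equal_join_entries_py : Prop := ∀ (entries : List (List String)), Dom_join_entries_py entries → Spec_join_entries_py entries (join_entries_py entries)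

-- ===== LEMMAS AND PROOFS =====

/-- One entry as it appears in the output when it is not the last entry. -/
def pvTrail (entry : List String) : List String :=
  entry.dropLast ++ (entry.getLast?.map (· ++ ",")).toList

theorem pvTrail_append_singleton (e : List String) (x : String) :
    pvTrail (e ++ [x]) = e ++ [x ++ ","] := by
  simp [pvTrail]

/-- Which global positions B marks for a tail of entries starting at offset pos. -/
def pvMarked : List (List String) → Int → Int → Bool
  | [], _, _ => false
  | e :: rest, pos, x =>
    (decide (e ≠ []) && decide (x = pos + (e.length : Int) - 1)) || pvMarked rest (pos + e.length) x

def pvTotal (l : List (List String)) : Int := ((l.flatMap (fun e => e)).length : Int)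

theorem pvTotal_cons (e : List String) (l : List (List String)) :
    pvTotal (e :: l) = (e.length : Int) + pvTotal l := by
  simp [pvTotal]

/-- pvTotal is nonnegative (used via omega above and below). -/
theorem pvMarked_bounds_aux (l : List (List String)) : (0 : Int) ≤ pvTotal l := by
  unfold pvTotal; exact Int.natCast_nonneg _

theorem pvMarked_bounds : ∀ (l : List (List String)) (pos x : Int),
    pvMarked l pos x = true → pos ≤ x ∧ x < pos + pvTotal l := by
  intro l
  induction l with
  | nil => simp [pvMarked]
  | cons e rest ih =>
    intro pos x h
    rw [pvMarked, Bool.or_eq_true, Bool.and_eq_true, decide_eq_true_iff, decide_eq_true_iff] at h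
    rw [pvTotal_cons]
    rcases h with ⟨he, rfl⟩ | h
    · have : (1 : Int) ≤ e.length := by
        have := List.length_pos_iff.mpr he; omega
      have := pvMarked_bounds_aux rest
      constructor <;> omega
    · have := ih (pos + e.length) x h
      omega
/-- B's marking fold: final position and set membership. -/
theorem pv_fold_marks : ∀ (l : List (List String)) (S : PySem.Set Int) (pos : Int),
    (l.foldl
      (fun (st : PySem.Set Int × Int) entry =>
        (if entry ≠ [] then PySem.Set.add st.1 (st.2 + (entry.length : Int) - 1) else st.1,
          st.2 + (entry.length : Int))) (S, pos)).2
      = pos + pvTotal l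
    ∧ ∀ x : Int,
      (x ∈ (l.foldl
        (fun (st : PySem.Set Int × Int) entry =>
          (if entry ≠ [] then PySem.Set.add st.1 (st.2 + (entry.length : Int) - 1) else st.1,
            st.2 + (entry.length : Int))) (S, pos)).1
        ↔ x ∈ S ∨ pvMarked l pos x = true) := by
  intro l
  induction l with
  | nil => simp [pvTotal, pvMarked]
  | cons e rest ih =>
    intro S pos
    simp only [List.foldl_cons]
    refine ⟨?_, ?_⟩
    · rw [(ih _ _).1, pvTotal_cons]; ring
    · intro x
      rw [(ih _ _).2 x, pvMarked]
      by_cases he : e = []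
      · simp [he]
      · rw [if_pos he, PySem.Set.mem_add]
        simp only [he, ne_eq, not_false_eq_true, decide_true, Bool.true_and,
          Bool.or_eq_true, decide_eq_true_iff]
        tauto

/-- Annotating the enumeration of one entry with its own last index gives pvTrail. -/
theorem pv_annot_entry (e : List String) (off : Int) :
    (PySem.List.enumerate e off).map
      (fun kl => if kl.1 = off + (e.length : Int) - 1 then kl.2 ++ "," else kl.2) = pvTrail e := by
  induction e using List.reverseRecOn with
  | nil => simp [PySem.List.enumerate, pvTrail]
  | append_singleton e x _ =>
    rw [PySem.List.enumerate_append, List.map_append]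
    have hfront : (PySem.List.enumerate e off).map
        (fun kl => if kl.1 = off + ((e ++ [x]).length : Int) - 1 then kl.2 ++ "," else kl.2)
        = (PySem.List.enumerate e off).map (·.2) := by
      apply List.map_congr_left
      intro p hp
      rcases ((PySem.List.mem_enumerate_iff _ _ _).mp hp) with ⟨k, hk, rfl⟩
      have h2 : ¬ off + (k : Int) = off + ((e.length : Int) + 1) - 1 := by omega
      simp [h2]
    rw [hfront, PySem.List.map_snd_enumerate]
    have hlast : (off + (e.length : Int) = off + ((e.length : Int) + 1) - 1) := by ring
    simp [PySem.List.enumerate, hlast, pvTrail_append_singleton]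

/-- Annotating the flattened lines with any predicate agreeing with pvMarked. -/
theorem pv_annot_flat (P : Int → Bool) : ∀ (l : List (List String)) (off : Int),
    (∀ k : Int, off ≤ k → k < off + pvTotal l → P k = pvMarked l off k) →
    (PySem.List.enumerate (l.flatMap (fun e => e)) off).map
      (fun kl => if P kl.1 then kl.2 ++ "," else kl.2) = l.flatMap pvTrail := by
  intro l
  induction l with
  | nil => intro off _; simp
  | cons e rest ih =>
    intro off hP
    have htot : pvTotal (e :: rest) = (e.length : Int) + pvTotal rest := pvTotal_cons e rest
    have htr : (0 : Int) ≤ pvTotal rest := pvMarked_bounds_aux rest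
    simp only [List.flatMap_cons]
    rw [PySem.List.enumerate_append, List.map_append]
    have hfront : (PySem.List.enumerate e off).map
        (fun kl => if P kl.1 then kl.2 ++ "," else kl.2)
        = (PySem.List.enumerate e off).map
          (fun kl => if kl.1 = off + (e.length : Int) - 1 then kl.2 ++ "," else kl.2) := by
      apply List.map_congr_left
      intro p hp
      rcases ((PySem.List.mem_enumerate_iff _ _ _).mp hp) with ⟨k, hk, rfl⟩
      have hk1 : (k : Int) < (e.length : Int) := by exact_mod_cast hk
      have hPk : P (off + (k : Int)) = pvMarked (e :: rest) off (off + (k : Int)) := by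
        apply hP <;> omega
      have hrest : pvMarked rest (off + (e.length : Int)) (off + (k : Int)) = false := by
        by_contra h
        have := pvMarked_bounds rest (off + (e.length : Int)) (off + (k : Int))
          (by revert h; cases pvMarked rest (off + (e.length : Int)) (off + (k : Int)) <;> simp)
        omega
      have hne : e ≠ [] := by intro h; subst h; simp at hk
      rw [pvMarked, hrest] at hPk
      simp only [hne, ne_eq, not_false_eq_true, decide_true, Bool.true_and, Bool.or_false] at hPk
      simp only [hPk]
      by_cases hc : off + (k : Int) = off + (e.length : Int) - 1 <;> simp [hc]
    rw [hfront, pv_annot_entry]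
    have htail : (PySem.List.enumerate (rest.flatMap (fun e => e)) (off + (e.length : Int))).map
        (fun kl => if P kl.1 then kl.2 ++ "," else kl.2) = rest.flatMap pvTrail := by
      apply ih
      intro k h1 h2
      have hPk : P k = pvMarked (e :: rest) off k := by
        apply hP <;> omega
      have hfst : ¬ (k = off + (e.length : Int) - 1) := by omega
      rw [pvMarked] at hPk
      simpa [hfst] using hPk
    rw [htail]

/-- Characterization of B. -/
theorem pvB_char (entries : List (List String)) :
    join_entries_py_alt entries = entries.dropLast.flatMap pvTrail ++ (entries.getLast?.getD []) := by
  rcases List.eq_nil_or_concat entries with rfl | ⟨init, last, rfl⟩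
  · rfl
  · unfold join_entries_py_alt
    dsimp only
    simp only [List.concat_eq_append]
    rw [PySem.List.slice_to_neg_one]
    have hdrop : (init ++ [last]).dropLast = init := by simp
    have hlastq : (init ++ [last]).getLast?.getD [] = last := by simp
    rw [hdrop, hlastq]
    have hm := pv_fold_marks init PySem.Set.empty 0
    set F := init.foldl
        (fun (st : PySem.Set Int × Int) entry =>
          (if entry ≠ [] then PySem.Set.add st.1 (st.2 + (entry.length : Int) - 1) else st.1,
            st.2 + (entry.length : Int))) (PySem.Set.empty, 0)
    have hmem : ∀ x : Int, (x ∈ F.1 ↔ pvMarked init 0 x = true) := by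
      intro x
      rw [hm.2 x]
      simp [PySem.Set.empty]
    have hflat : (init ++ [last]).flatMap (fun e => e) = init.flatMap (fun e => e) ++ last := by
      simp
    rw [hflat, PySem.List.enumerate_append, List.map_append]
    have hfront : (PySem.List.enumerate (init.flatMap fun e => e) 0).map
        (fun kl => if PySem.Set.contains F.1 kl.1 then kl.2 ++ "," else kl.2)
        = init.flatMap pvTrail := by
      apply pv_annot_flat (fun k => PySem.Set.contains F.1 k) init 0
      intro k h1 h2
      by_cases hx : k ∈ F.1
      · rw [(hmem k).mp hx]
        simp [hx]
      · have hb : pvMarked init 0 k = false := by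
          cases h : pvMarked init 0 k
          · rfl
          · exact absurd ((hmem k).mpr h) hx
        rw [hb]
        simp [hx]
    have htail : (PySem.List.enumerate last ((0 : Int) + (init.flatMap fun e => e).length)).map
        (fun kl => if PySem.Set.contains F.1 kl.1 then kl.2 ++ "," else kl.2)
        = last := by
      have hcopy : (PySem.List.enumerate last ((0 : Int) + (init.flatMap fun e => e).length)).map
          (fun kl => if PySem.Set.contains F.1 kl.1 then kl.2 ++ "," else kl.2)
          = (PySem.List.enumerate last ((0 : Int) + (init.flatMap fun e => e).length)).map (·.2) := by
        apply List.map_congr_left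
        intro p hp
        rcases ((PySem.List.mem_enumerate_iff _ _ _).mp hp) with ⟨k, hk, rfl⟩
        have hnot : ((0 : Int) + (init.flatMap fun e => e).length + (k : Int)) ∉ F.1 := by
          intro hx
          have hmk := (hmem _).mp hx
          have hbd := pvMarked_bounds init 0 _ hmk
          have hge : (0 : Int) ≤ (k : Int) := Int.natCast_nonneg _
          unfold pvTotal at hbd
          omega
        simp at hnot
        simp [hnot]
      rw [hcopy, PySem.List.map_snd_enumerate]
    rw [hfront, htail]

/-- A's inner loop when the branch condition is never true: lines are copied. -/
theorem pv_foldl_plain {α : Type} (C : Int × α → Prop) [DecidablePred C]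
    (g : Int × α → α) :
    ∀ (l : List (Int × α)) (acc : List α), (∀ p ∈ l, ¬ C p) →
      l.foldl (fun out p => if C p then out ++ [g p] else out ++ [p.2]) acc
        = acc ++ l.map (·.2) := by
  intro l
  induction l with
  | nil => simp
  | cons p l ih =>
    intro acc h
    have hp : ¬ C p := h p (by simp)
    simp [List.foldl_cons, if_neg hp, ih _ (fun q hq => h q (by simp [hq]))]

/-- A's inner loop over one entry, with the is_last_entry test generalized. -/
theorem pv_inner (P : Prop) [Decidable P] (entry : List String) (acc : List String) :
    (PySem.List.enumerate entry).foldl (fun out' jl =>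
        if jl.1 = (entry.length : Int) - 1 ∧ ¬ P then out' ++ [jl.2 ++ ","] else out' ++ [jl.2]) acc
      = acc ++ (if P then entry else pvTrail entry) := by
  induction entry using List.reverseRecOn with
  | nil => simp [PySem.List.enumerate, pvTrail]
  | append_singleton e x _ =>
    rw [PySem.List.enumerate_append]
    rw [List.foldl_append]
    rw [pv_foldl_plain _ _ _ acc ?hpre]
    case hpre =>
      intro p hp hC
      rcases ((PySem.List.mem_enumerate_iff _ _ _).mp hp) with ⟨k, hk, rfl⟩
      have : (k : Int) = (e.length : Int) + 1 - 1 := by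
        simpa using hC.1
      omega
    simp only [PySem.List.enumerate, List.foldl_cons, List.foldl_nil]
    by_cases hP : P
    · have : ¬ (((0 : Int) + e.length = ((e ++ [x]).length : Int) - 1) ∧ ¬ P) := by
        intro h; exact h.2 hP
      simp [hP, PySem.List.map_snd_enumerate]
    · have : ((0 : Int) + e.length = ((e ++ [x]).length : Int) - 1) ∧ ¬ P := by
        refine ⟨?_, hP⟩
        simp
      simp [this, PySem.List.map_snd_enumerate, pvTrail_append_singleton]

/-- A's outer loop over the non-last entries: each contributes pvTrail. -/
theorem pv_outerA (L : Int) :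
    ∀ (l : List (Int × List String)) (acc : List String), (∀ p ∈ l, p.1 ≠ L - 1) →
      l.foldl (fun out ie =>
          (PySem.List.enumerate ie.2).foldl (fun out' jl =>
            if jl.1 = (ie.2.length : Int) - 1 ∧ ¬ (ie.1 = L - 1) then out' ++ [jl.2 ++ ","]
            else out' ++ [jl.2]) out) acc
        = acc ++ (l.map (·.2)).flatMap pvTrail := by
  intro l
  induction l with
  | nil => simp
  | cons p l ih =>
    intro acc h
    have hp : ¬ (p.1 = L - 1) := h p (by simp)
    rw [List.foldl_cons, pv_inner (p.1 = L - 1) p.2 acc, if_neg hp,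
      ih _ (fun q hq => h q (by simp [hq]))]
    simp

/-- Characterization of A. -/
theorem pvA_char (entries : List (List String)) :
    join_entries_py entries = entries.dropLast.flatMap pvTrail ++ (entries.getLast?.getD []) := by
  rcases List.eq_nil_or_concat entries with rfl | ⟨init, last, rfl⟩
  · rfl
  · simp only [List.concat_eq_append]
    unfold join_entries_py
    rw [PySem.List.enumerate_append, List.foldl_append,
      pv_outerA (((init ++ [last]).length : Int)) _ [] ?hpre]
    case hpre =>
      intro p hp
      rcases ((PySem.List.mem_enumerate_iff _ _ _).mp hp) with ⟨k, hk, rfl⟩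
      simp only [List.length_append, List.length_cons, List.length_nil]
      omega
    simp only [PySem.List.enumerate, List.foldl_cons, List.foldl_nil]
    rw [pv_inner ((0 : Int) + init.length = (((init ++ [last]).length : Int)) - 1) last]
    have hlastidx : ((0 : Int) + init.length = (((init ++ [last]).length : Int)) - 1) := by
      simp
    rw [if_pos hlastidx]
    simp [PySem.List.map_snd_enumerate]

-- ===== VERDICT (by name: the statement is the Claim_ definition above) =====
theorem join_entries_py_spec : Claim_equal_join_entries_py := by
  intro entries _
  unfold Spec_join_entries_py
  rw [pvA_char, pvB_char]
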